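-- pv_equiv track=rewrite | github.com/petrivich768/search_bot | main.py | format_psbdmp
-- ===== SOURCE A (Python) =====
-- def format_dict_as_damage(data_dict: dict, title: str = None, indent: int = 0) -> str:
--     lines = []
--     if title:
--         lines.append(f"\n{title}")
--     for key, value in data_dict.items():
--         if isinstance(value, dict):
--             lines.append(f"{'│' * indent}├{key}:")
--             lines.append(format_dict_as_damage(value, indent=indent+1))
--         elif isinstance(value, list):
--             if value:
--                 lines.append(f"{'│' * indent}├{key}:")
--                 for item in value[:10]:
--                     lines.append(f"{'│' * (indent+1)}├{item}")
--                 if len(value) > 10: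
--                     lines.append(f"{'│' * (indent+1)}└... и ещё {len(value)-10}")
--             else:
--                 lines.append(f"{'│' * indent}├{key}: нет данных")
--         else:
--             lines.append(f"{'│' * indent}├{key}: {value}")
--     return "\n".join(lines)
--
-- def format_psbdmp(data, query, search_type):
--     if not isinstance(data, list) or not data:
--         return None
--     items = {"Найдено паст": len(data)}
--     pastes = []
--     for p in data[:10]:
--         paste_id = p.get('id', '?')
--         tags = p.get('tags', '?')
--         pastes.append(f"ID: {paste_id} | Теги: {tags}")
--     items["Пасты"] = pastes
--     return format_dict_as_damage(items, title="✅ PSBDmp")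
-- ===== SOURCE B (Python) =====
-- def format_psbdmp(data, query, search_type):
--     if not isinstance(data, list) or not data:
--         return None
--     lines = ["\n✅ PSBDmp", f"├Найдено паст: {len(data)}", "├Пасты:"]
--     lines += [f"│├ID: {p.get('id', '?')} | Теги: {p.get('tags', '?')}" for p in data[:10]]
--     return "\n".join(lines)
-- ===== Notes on version B (the rewrite author's own statement) =====
-- stated objective: simpler
-- what changed: B drops A's intermediate dict and the generic recursive format_dict_as_damage formatter and builds the report lines directly as literal strings joined with newlines.
import Mathlib
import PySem

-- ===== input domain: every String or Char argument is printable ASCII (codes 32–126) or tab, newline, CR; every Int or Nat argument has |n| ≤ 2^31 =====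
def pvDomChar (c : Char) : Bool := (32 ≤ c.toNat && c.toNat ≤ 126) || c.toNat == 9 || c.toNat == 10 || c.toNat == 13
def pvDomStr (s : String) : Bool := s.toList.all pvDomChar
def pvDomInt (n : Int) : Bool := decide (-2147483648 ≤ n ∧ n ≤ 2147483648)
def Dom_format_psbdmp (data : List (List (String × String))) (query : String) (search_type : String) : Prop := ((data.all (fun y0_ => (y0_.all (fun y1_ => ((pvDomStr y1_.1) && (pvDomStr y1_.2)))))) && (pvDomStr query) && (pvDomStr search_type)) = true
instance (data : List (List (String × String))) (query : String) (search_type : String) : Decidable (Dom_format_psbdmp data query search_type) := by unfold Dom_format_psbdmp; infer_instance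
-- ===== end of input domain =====

-- B builds the report string directly (simpler decomposition), dropping A's intermediate
-- dict and the generic recursive formatter; return values proved equal.

-- ===== PORT A =====
-- The values of A's intermediate dict `items` are an int or a list of strings.
inductive PVal
  | vint : Int → PVal
  | vlist : List String → PVal
deriving DecidableEq, Repr

-- '│' * indent
def pvBars (indent : Nat) : String := String.ofList (List.replicate indent '│')

-- literal port of format_dict_as_damage, specialized to PVal values (the dict-valued
-- branch of A is unreachable for PVal and is omitted; exact on every PVal input)
def format_dict_as_damage (d : List (String × PVal)) (title : Option String) (indent : Nat) : String :=
  let lines : List String := match title with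
    | some t => ["\n" ++ t]
    | none => []
  let lines := d.foldl (fun lines kv =>
    match kv.2 with
    | .vlist v =>
      if v ≠ [] then
        let lines := lines ++ [pvBars indent ++ "├" ++ kv.1 ++ ":"]
        let lines := (v.take 10).foldl (fun ls item => ls ++ [pvBars (indent+1) ++ "├" ++ item]) lines
        if v.length > 10 then
          lines ++ [pvBars (indent+1) ++ "└... и ещё " ++ PySem.Int.toStr ((v.length : Int) - 10)]
        else lines
      else lines ++ [pvBars indent ++ "├" ++ kv.1 ++ ": нет данных"]
    | .vint n => lines ++ [pvBars indent ++ "├" ++ kv.1 ++ ": " ++ PySem.Int.toStr n]) lines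
  PySem.Str.join "\n" lines

def format_psbdmp (data : List (List (String × String))) (query : String) (search_type : String) : Option String :=
  if data = [] then none
  else
    let items : List (String × PVal) := [("Найдено паст", .vint (data.length : Int))]
    let pastes : List String := (data.take 10).foldl (fun ps p =>
      ps ++ ["ID: " ++ PySem.Dict.getD ⟨p⟩ "id" "?" ++ " | Теги: " ++ PySem.Dict.getD ⟨p⟩ "tags" "?"]) []
    let items := items ++ [("Пасты", .vlist pastes)]
    some (format_dict_as_damage items (some "✅ PSBDmp") 0)

-- ===== PORT B =====
def format_psbdmp_alt (data : List (List (String × String))) (query : String) (search_type : String) : Option String :=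
  if data = [] then none
  else some (PySem.Str.join "\n"
    (["\n✅ PSBDmp", "├Найдено паст: " ++ PySem.Int.toStr (data.length : Int), "├Пасты:"]
      ++ (data.take 10).map (fun p =>
        "│├ID: " ++ PySem.Dict.getD ⟨p⟩ "id" "?" ++ " | Теги: " ++ PySem.Dict.getD ⟨p⟩ "tags" "?")))

-- ===== PRECONDITION & SPEC =====
def Spec_format_psbdmp (data : List (List (String × String))) (query : String) (search_type : String) (out : Option String) : Prop := out = format_psbdmp_alt data query search_type
instance (data : List (List (String × String))) (query : String) (search_type : String) (out : Option String) : Decidable (Spec_format_psbdmp data query search_type out) := by unfold Spec_format_psbdmp; infer_instance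

-- ===== CLAIM (what is proved, stated in full; the proofs are below) =====
def Claim_equal_format_psbdmp : Prop := ∀ (data : List (List (String × String))) (query : String) (search_type : String), Dom_format_psbdmp data query search_type → Spec_format_psbdmp data query search_type (format_psbdmp data query search_type)

-- ===== LEMMAS AND PROOFS =====

theorem format_psbdmp_eq_alt (data : List (List (String × String))) (query search_type : String) :
    format_psbdmp data query search_type = format_psbdmp_alt data query search_type := by
  unfold format_psbdmp format_psbdmp_alt
  by_cases h : data = []
  · simp [h]
  · simp only [h, ite_false]
    congr 1
    unfold format_dict_as_damage
    simp only [List.singleton_append, List.foldl_cons, List.foldl_nil, List.nil_append,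
      PySem.List.foldl_append_singleton_eq_map]
    have hne : (List.map (fun p =>
        "ID: " ++ PySem.Dict.getD ⟨p⟩ "id" "?" ++ " | Теги: " ++ PySem.Dict.getD ⟨p⟩ "tags" "?")
      (List.take 10 data)) ≠ [] := by
      simp [List.map_eq_nil_iff, List.take_eq_nil_iff, h]
    have hlen : (List.map (fun p =>
        "ID: " ++ PySem.Dict.getD ⟨p⟩ "id" "?" ++ " | Теги: " ++ PySem.Dict.getD ⟨p⟩ "tags" "?")
      (List.take 10 data)).length ≤ 10 := by
      simp [List.length_take]
    rw [if_pos hne, if_neg (by omega), List.take_of_length_le hlen]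
    congr 1
    simp only [List.map_map, List.cons_append, List.nil_append]
    have e1 : "\n" ++ "✅ PSBDmp" = "\n✅ PSBDmp" := rfl
    have e2 : pvBars 0 ++ "├" ++ "Найдено паст" ++ ": " = "├Найдено паст: " := rfl
    have e3 : pvBars 0 ++ "├" ++ "Пасты" ++ ":" = "├Пасты:" := rfl
    rw [e1, e2, e3]
    congr 1

-- ===== VERDICT (by name: the statement is the Claim_ definition above) =====
theorem format_psbdmp_spec : Claim_equal_format_psbdmp := by
  intro data query search_type _
  unfold Spec_format_psbdmp
  exact format_psbdmp_eq_alt data query search_type
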